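-- pv_equiv track=rewrite | github.com/Liusrepo/Paper_Agent | src/utils/utils.py | is_elsevier_doi
-- ===== SOURCE A (Python) =====
-- def is_elsevier_doi(doi: str) -> bool:
--     """Check if DOI belongs to Elsevier publisher."""
--     if not doi:
--         return False
--
--     elsevier_prefixes = [
--         '10.1016/',  # Elsevier main prefix
--         '10.1006/',  # Academic Press
--         '10.1053/',  # W.B. Saunders
--         '10.1054/',  # Academic Press
--         '10.1078/',  # Urban & Fischer
--         '10.1529/',  # Cell Press
--     ]
--
--     non_elsevier_prefixes = [
--         '10.1007/',  # Springer
--         '10.1021/',  # ACS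
--         '10.1002/',  # Wiley
--         '10.1063/',  # AIP
--         '10.1088/',  # IOP
--         '10.1103/',  # APS
--         '10.1038/',  # Nature
--         '10.1126/',  # Science
--         '10.3390/',  # MDPI
--         '10.1039/',  # RSC
--     ]
--
--     doi_lower = doi.lower()
--
--     # Check if explicitly non-Elsevier
--     for prefix in non_elsevier_prefixes:
--         if doi_lower.startswith(prefix.lower()):
--             return False
--
--     # Check if Elsevier
--     for prefix in elsevier_prefixes:
--         if doi_lower.startswith(prefix.lower()):
--             return True
--
--     return False
-- ===== SOURCE B (Python) =====
-- _ELSEVIER_PREFIXES = {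
--     '10.1016/',  # Elsevier main prefix
--     '10.1006/',  # Academic Press
--     '10.1053/',  # W.B. Saunders
--     '10.1054/',  # Academic Press
--     '10.1078/',  # Urban & Fischer
--     '10.1529/',  # Cell Press
-- }
--
--
-- def is_elsevier_doi(doi: str) -> bool:
--     """Check if DOI belongs to Elsevier publisher."""
--     if not doi:
--         return False
--     # All Elsevier prefixes are exactly 8 characters; the non-Elsevier list of A
--     # is redundant (disjoint from the Elsevier prefixes), so one lookup suffices.
--     return doi.lower()[:8] in _ELSEVIER_PREFIXES
-- ===== Notes on version B (the rewrite author's own statement) =====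
-- stated objective: simpler
-- what changed: Replaced the two sequential startswith loops (including the redundant non-Elsevier blacklist, disjoint from the Elsevier prefixes) by a single constant-time set lookup of the first 8 lowercased characters.
import Mathlib
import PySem

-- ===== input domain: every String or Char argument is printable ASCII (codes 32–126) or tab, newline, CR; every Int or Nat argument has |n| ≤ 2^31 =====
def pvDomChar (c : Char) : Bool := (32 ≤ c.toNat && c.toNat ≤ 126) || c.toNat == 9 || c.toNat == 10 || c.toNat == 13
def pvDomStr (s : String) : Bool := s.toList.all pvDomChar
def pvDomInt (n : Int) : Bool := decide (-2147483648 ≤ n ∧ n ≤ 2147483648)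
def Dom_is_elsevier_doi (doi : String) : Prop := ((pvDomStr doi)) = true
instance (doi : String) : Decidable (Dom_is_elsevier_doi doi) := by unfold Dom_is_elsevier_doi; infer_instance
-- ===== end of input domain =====

-- B replaces A's two startswith scans (whose non-Elsevier blacklist is redundant)
-- by a single set lookup of the first 8 lowercased characters; objective: simpler.

-- ===== PORT A =====
def is_elsevier_doi (doi : String) : Bool :=
  if doi == "" then false
  else
    let elsevier_prefixes : List String :=
      ["10.1016/", "10.1006/", "10.1053/", "10.1054/", "10.1078/", "10.1529/"]
    let non_elsevier_prefixes : List String :=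
      ["10.1007/", "10.1021/", "10.1002/", "10.1063/", "10.1088/",
       "10.1103/", "10.1038/", "10.1126/", "10.3390/", "10.1039/"]
    let doi_lower := PySem.Str.lower doi
    -- 'for prefix in …: if doi_lower.startswith(prefix.lower()): return …' as List.any
    if non_elsevier_prefixes.any (fun p => PySem.Str.startswith doi_lower (PySem.Str.lower p)) then
      false
    else if elsevier_prefixes.any (fun p => PySem.Str.startswith doi_lower (PySem.Str.lower p)) then
      true
    else
      false

-- ===== PORT B =====
def pvElsevierPrefixSet : PySem.Set String :=
  PySem.Set.ofList ["10.1016/", "10.1006/", "10.1053/", "10.1054/", "10.1078/", "10.1529/"]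

def is_elsevier_doi_alt (doi : String) : Bool :=
  if doi == "" then false
  else PySem.Set.contains pvElsevierPrefixSet
        (PySem.Str.slice (PySem.Str.lower doi) none (some 8))

-- ===== PRECONDITION & SPEC =====
def Spec_is_elsevier_doi (doi : String) (out : Bool) : Prop := out = is_elsevier_doi_alt doi
instance (doi : String) (out : Bool) : Decidable (Spec_is_elsevier_doi doi out) := by unfold Spec_is_elsevier_doi; infer_instance

-- ===== CLAIM (what is proved, stated in full; the proofs are below) =====
def Claim_equal_is_elsevier_doi : Prop := ∀ (doi : String), Dom_is_elsevier_doi doi → Spec_is_elsevier_doi doi (is_elsevier_doi doi)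

-- ===== LEMMAS AND PROOFS =====

-- startswith by an 8-character prefix is equality of the first 8 characters
theorem pv_sw (s p : String) (h : p.toList.length = 8) :
    PySem.Str.startswith s p = decide (s.toList.take 8 = p.toList) := by
  have hiff := PySem.Chars.startswith_iff s.toList p.toList
  rw [List.prefix_iff_eq_take, h] at hiff
  rw [PySem.Str.startswith_eq]
  by_cases hc : s.toList.take 8 = p.toList
  · simp [hc, hiff.mpr hc.symm]
  · simp only [hc, decide_false]
    rw [Bool.eq_false_iff]
    intro hb
    exact hc (hiff.mp hb).symm

theorem pv_beq (x p : String) : (x == p) = decide (x.toList = p.toList) := by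
  rw [Bool.eq_iff_iff]
  simp [String.toList_inj]

set_option maxHeartbeats 1000000 in
theorem pv_core (doi : String) : is_elsevier_doi doi = is_elsevier_doi_alt doi := by
  by_cases h0 : doi == ""
  · simp [is_elsevier_doi, is_elsevier_doi_alt, h0]
  · have hsl : (PySem.Str.slice (PySem.Str.lower doi) none (some 8)).toList
        = (PySem.Str.lower doi).toList.take 8 := by
      rw [PySem.Str.toList_slice, PySem.Chars.slice_eq_listSlice,
          PySem.List.slice_to _ (by norm_num : (0:Int) ≤ 8)]
      rfl
    set dl := PySem.Str.lower doi with hdl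
    have e0 : PySem.Str.startswith dl (PySem.Str.lower "10.1007/") = decide (dl.toList.take 8 = "10.1007/".toList) := by
      rw [show PySem.Str.lower "10.1007/" = "10.1007/" from by decide]; exact pv_sw dl "10.1007/" (by decide)
    have e1 : PySem.Str.startswith dl (PySem.Str.lower "10.1021/") = decide (dl.toList.take 8 = "10.1021/".toList) := by
      rw [show PySem.Str.lower "10.1021/" = "10.1021/" from by decide]; exact pv_sw dl "10.1021/" (by decide)
    have e2 : PySem.Str.startswith dl (PySem.Str.lower "10.1002/") = decide (dl.toList.take 8 = "10.1002/".toList) := by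
      rw [show PySem.Str.lower "10.1002/" = "10.1002/" from by decide]; exact pv_sw dl "10.1002/" (by decide)
    have e3 : PySem.Str.startswith dl (PySem.Str.lower "10.1063/") = decide (dl.toList.take 8 = "10.1063/".toList) := by
      rw [show PySem.Str.lower "10.1063/" = "10.1063/" from by decide]; exact pv_sw dl "10.1063/" (by decide)
    have e4 : PySem.Str.startswith dl (PySem.Str.lower "10.1088/") = decide (dl.toList.take 8 = "10.1088/".toList) := by
      rw [show PySem.Str.lower "10.1088/" = "10.1088/" from by decide]; exact pv_sw dl "10.1088/" (by decide)
    have e5 : PySem.Str.startswith dl (PySem.Str.lower "10.1103/") = decide (dl.toList.take 8 = "10.1103/".toList) := by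
      rw [show PySem.Str.lower "10.1103/" = "10.1103/" from by decide]; exact pv_sw dl "10.1103/" (by decide)
    have e6 : PySem.Str.startswith dl (PySem.Str.lower "10.1038/") = decide (dl.toList.take 8 = "10.1038/".toList) := by
      rw [show PySem.Str.lower "10.1038/" = "10.1038/" from by decide]; exact pv_sw dl "10.1038/" (by decide)
    have e7 : PySem.Str.startswith dl (PySem.Str.lower "10.1126/") = decide (dl.toList.take 8 = "10.1126/".toList) := by
      rw [show PySem.Str.lower "10.1126/" = "10.1126/" from by decide]; exact pv_sw dl "10.1126/" (by decide)
    have e8 : PySem.Str.startswith dl (PySem.Str.lower "10.3390/") = decide (dl.toList.take 8 = "10.3390/".toList) := by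
      rw [show PySem.Str.lower "10.3390/" = "10.3390/" from by decide]; exact pv_sw dl "10.3390/" (by decide)
    have e9 : PySem.Str.startswith dl (PySem.Str.lower "10.1039/") = decide (dl.toList.take 8 = "10.1039/".toList) := by
      rw [show PySem.Str.lower "10.1039/" = "10.1039/" from by decide]; exact pv_sw dl "10.1039/" (by decide)
    have e10 : PySem.Str.startswith dl (PySem.Str.lower "10.1016/") = decide (dl.toList.take 8 = "10.1016/".toList) := by
      rw [show PySem.Str.lower "10.1016/" = "10.1016/" from by decide]; exact pv_sw dl "10.1016/" (by decide)
    have e11 : PySem.Str.startswith dl (PySem.Str.lower "10.1006/") = decide (dl.toList.take 8 = "10.1006/".toList) := by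
      rw [show PySem.Str.lower "10.1006/" = "10.1006/" from by decide]; exact pv_sw dl "10.1006/" (by decide)
    have e12 : PySem.Str.startswith dl (PySem.Str.lower "10.1053/") = decide (dl.toList.take 8 = "10.1053/".toList) := by
      rw [show PySem.Str.lower "10.1053/" = "10.1053/" from by decide]; exact pv_sw dl "10.1053/" (by decide)
    have e13 : PySem.Str.startswith dl (PySem.Str.lower "10.1054/") = decide (dl.toList.take 8 = "10.1054/".toList) := by
      rw [show PySem.Str.lower "10.1054/" = "10.1054/" from by decide]; exact pv_sw dl "10.1054/" (by decide)
    have e14 : PySem.Str.startswith dl (PySem.Str.lower "10.1078/") = decide (dl.toList.take 8 = "10.1078/".toList) := by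
      rw [show PySem.Str.lower "10.1078/" = "10.1078/" from by decide]; exact pv_sw dl "10.1078/" (by decide)
    have e15 : PySem.Str.startswith dl (PySem.Str.lower "10.1529/") = decide (dl.toList.take 8 = "10.1529/".toList) := by
      rw [show PySem.Str.lower "10.1529/" = "10.1529/" from by decide]; exact pv_sw dl "10.1529/" (by decide)
    have hset : pvElsevierPrefixSet
        = ["10.1016/", "10.1006/", "10.1053/", "10.1054/", "10.1078/", "10.1529/"] := by decide
    simp only [is_elsevier_doi, is_elsevier_doi_alt, h0, Bool.false_eq_true, if_false,
      List.any_cons, List.any_nil, Bool.or_false, ← hdl, e0, e1, e2, e3, e4, e5, e6, e7, e8, e9, e10, e11, e12, e13, e14, e15]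
    rw [hset]
    simp only [PySem.Set.contains, List.contains_eq_any_beq, List.any_cons, List.any_nil,
      Bool.or_false, pv_beq, hsl]
    generalize dl.toList.take 8 = t
    by_cases g0 : t = (['1', '0', '.', '1', '0', '1', '6', '/'] : List Char)
    · subst g0; decide
    by_cases g1 : t = (['1', '0', '.', '1', '0', '0', '6', '/'] : List Char)
    · subst g1; decide
    by_cases g2 : t = (['1', '0', '.', '1', '0', '5', '3', '/'] : List Char)
    · subst g2; decide
    by_cases g3 : t = (['1', '0', '.', '1', '0', '5', '4', '/'] : List Char)
    · subst g3; decide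
    by_cases g4 : t = (['1', '0', '.', '1', '0', '7', '8', '/'] : List Char)
    · subst g4; decide
    by_cases g5 : t = (['1', '0', '.', '1', '5', '2', '9', '/'] : List Char)
    · subst g5; decide
    simp [g0, g1, g2, g3, g4, g5]

-- ===== VERDICT (by name: the statement is the Claim_ definition above) =====
theorem is_elsevier_doi_spec : Claim_equal_is_elsevier_doi := by
  intro doi _
  unfold Spec_is_elsevier_doi
  exact pv_core doi
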